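-- pv_equiv track=rewrite | github.com/paiml/depyler | examples/test_path_import.py | dirname
-- ===== SOURCE A (Python) =====
-- def dirname(path: str) -> str:
--     """Get the directory part of a path."""
--     if len(path) == 0:
--         return ""
--     i: int = len(path) - 1
--     while i >= 0:
--         if path[i] == "/":
--             return path[:i]
--         i = i - 1
--     return ""
-- ===== SOURCE B (Python) =====
-- def dirname(path: str) -> str:
--     """Get the directory part of a path."""
--     return "/".join(path.split("/")[:-1])
-- ===== Notes on version B (the rewrite author's own statement) =====
-- stated objective: simpler
-- what changed: Replaces the backward character scan for the last separator with split / drop-last-segment / rejoin, a one-line component-based reconstruction.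
import Mathlib
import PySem

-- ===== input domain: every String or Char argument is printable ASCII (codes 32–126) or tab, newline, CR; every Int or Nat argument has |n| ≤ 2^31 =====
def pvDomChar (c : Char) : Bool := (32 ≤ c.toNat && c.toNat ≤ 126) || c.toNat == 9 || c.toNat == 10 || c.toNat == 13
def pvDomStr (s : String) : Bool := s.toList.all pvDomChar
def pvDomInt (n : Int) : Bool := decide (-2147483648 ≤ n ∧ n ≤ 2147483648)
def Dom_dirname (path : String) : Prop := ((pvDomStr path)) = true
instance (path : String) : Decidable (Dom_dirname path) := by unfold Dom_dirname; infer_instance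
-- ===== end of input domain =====

-- B replaces A's backward scan for the last '/' by split/drop-last/rejoin ('simpler' objective).

-- ===== PORT A =====
-- the while loop 'i = len-1; while i >= 0: … i = i - 1' as structural recursion on fuel n = i + 1
def dirnameGo (cs : List Char) : Nat → List Char
  | 0 => []                                   -- i < 0: fall through, return ""
  | n + 1 =>
    if PySem.List.pyGet? cs (n : Int) = some '/' then PySem.List.slice cs none (some (n : Int))  -- path[:i]
    else dirnameGo cs n

def dirname (path : String) : String :=
  if PySem.Str.len path = 0 then ""
  else String.ofList (dirnameGo path.toList path.toList.length)

-- ===== PORT B =====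
-- '/'.join(path.split('/')[:-1])
def dirname_alt (path : String) : String :=
  String.ofList (PySem.Chars.join ['/'] (PySem.List.slice (PySem.Chars.splitOn path.toList ['/']) none (some (-1))))

-- ===== PRECONDITION & SPEC =====
def Spec_dirname (path : String) (out : String) : Prop := out = dirname_alt path
instance (path : String) (out : String) : Decidable (Spec_dirname path out) := by unfold Spec_dirname; infer_instance

-- ===== CLAIM (what is proved, stated in full; the proofs are below) =====
def Claim_equal_dirname : Prop := ∀ (path : String), Dom_dirname path → Spec_dirname path (dirname path)

-- ===== LEMMAS AND PROOFS =====

-- structural characterisation of PySem.Chars.splitOn on a one-character separator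
def mapHead (f : List Char → List Char) : List (List Char) → List (List Char)
  | [] => []
  | h :: t => f h :: t

def spl : List Char → List (List Char)
  | [] => [[]]
  | c :: r => if c = '/' then [] :: spl r else mapHead (c :: ·) (spl r)

theorem mapHead_mapHead (f g : List Char → List Char) (l : List (List Char)) :
    mapHead f (mapHead g l) = mapHead (fun x => f (g x)) l := by
  cases l <;> simp [mapHead]

theorem spl_ne_nil (r : List Char) : spl r ≠ [] := by
  induction r with
  | nil => simp [spl]
  | cons c r ih =>
    simp only [spl]
    split
    · simp
    · cases h : spl r with
      | nil => exact absurd h ih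
      | cons a t => simp [mapHead]

theorem splitOn_go_spec (fuel : Nat) :
    ∀ (l cur : List Char) (acc : List (List Char)), l.length < fuel →
    PySem.Chars.splitOn.go ['/'] fuel l cur acc =
      acc.reverse ++ mapHead (fun x => cur.reverse ++ x) (spl l) := by
  induction fuel with
  | zero => intro l cur acc h; omega
  | succ f ih =>
    intro l cur acc h
    cases l with
    | nil => simp [PySem.Chars.splitOn.go, spl, mapHead]
    | cons c rest =>
      by_cases hc : c = '/'
      · subst hc
        have : List.isPrefixOf ['/'] ('/' :: rest) = true := by simp [List.isPrefixOf]
        simp only [PySem.Chars.splitOn.go, this, if_pos]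
        rw [ih _ _ _ (by simpa using Nat.lt_of_succ_lt_succ h)]
        simp [spl, mapHead]
        cases hs : spl rest with
        | nil => exact absurd hs (spl_ne_nil rest)
        | cons a t => simp
      · have : List.isPrefixOf ['/'] (c :: rest) = false := by
          simp [List.isPrefixOf]; exact fun h' => hc h'.symm
        simp only [PySem.Chars.splitOn.go, this, Bool.false_eq_true, if_false]
        rw [ih _ _ _ (by simpa using Nat.lt_of_succ_lt_succ h)]
        simp only [spl, if_neg hc, mapHead_mapHead]
        congr 1
        cases hs : spl rest with
        | nil => exact absurd hs (spl_ne_nil rest)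
        | cons a t => simp [mapHead]

theorem splitOn_eq_spl (s : List Char) : PySem.Chars.splitOn s ['/'] = spl s := by
  unfold PySem.Chars.splitOn
  rw [splitOn_go_spec (s.length + 1) s [] [] (by omega)]
  cases hs : spl s with
  | nil => exact absurd hs (spl_ne_nil s)
  | cons a t => simp [mapHead]

theorem mem_iff_spl_len (r : List Char) : '/' ∈ r ↔ 2 ≤ (spl r).length := by
  induction r with
  | nil => simp [spl]
  | cons c r ih =>
    by_cases hc : c = '/'
    · subst hc
      have hp : 0 < (spl r).length := List.length_pos_iff.mpr (spl_ne_nil r)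
      have hspl : spl ('/' :: r) = [] :: spl r := by simp [spl]
      rw [hspl]
      simp only [List.length_cons, List.mem_cons, true_or, true_iff]
      omega
    · have hspl : spl (c :: r) = mapHead (c :: ·) (spl r) := by simp [spl, hc]
      rw [hspl]
      cases hs : spl r with
      | nil => exact absurd hs (spl_ne_nil r)
      | cons a t =>
        simp only [mapHead, List.length_cons, List.mem_cons]
        rw [show ('/' = c ∨ '/' ∈ r) ↔ ('/' ∈ r) by simp [Ne.symm hc], ih, hs]
        simp

theorem join_cons_head (c : Char) (h : List Char) (M : List (List Char)) :
    PySem.Chars.join ['/'] ((c :: h) :: M) = c :: PySem.Chars.join ['/'] (h :: M) := by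
  cases M with
  | nil => simp [PySem.Chars.join_singleton]
  | cons q rest => simp [PySem.Chars.join_cons_cons]

-- B's value, char-level
def bChars (cs : List Char) : List Char :=
  PySem.Chars.join ['/'] ((spl cs).dropLast)

theorem bChars_step (c : Char) (rest : List Char) :
    bChars (c :: rest) = if '/' ∈ rest then c :: bChars rest else [] := by
  unfold bChars
  by_cases hm : '/' ∈ rest
  · rw [if_pos hm]
    have h2 : 2 ≤ (spl rest).length := (mem_iff_spl_len rest).mp hm
    obtain ⟨h, t, hs⟩ : ∃ h t, spl rest = h :: t := by
      cases hs : spl rest with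
      | nil => exact absurd hs (spl_ne_nil rest)
      | cons a t => exact ⟨a, t, rfl⟩
    have ht : t ≠ [] := by
      intro h0; rw [hs, h0] at h2; simp at h2
    by_cases hc : c = '/'
    · subst hc
      have hspl : spl ('/' :: rest) = [] :: h :: t := by simp [spl, hs]
      rw [hspl, hs, List.dropLast_cons_of_ne_nil (by simp), List.dropLast_cons_of_ne_nil ht,
        PySem.Chars.join_cons_cons]
      simp
    · have hspl : spl (c :: rest) = (c :: h) :: t := by simp [spl, hc, hs, mapHead]
      rw [hspl, hs, List.dropLast_cons_of_ne_nil ht, List.dropLast_cons_of_ne_nil ht]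
      exact join_cons_head c h t.dropLast
  · rw [if_neg hm]
    have hp : 0 < (spl rest).length := List.length_pos_iff.mpr (spl_ne_nil rest)
    have h1 : (spl rest).length = 1 := by
      have := (mem_iff_spl_len rest).not.mp hm
      omega
    obtain ⟨h, hs⟩ : ∃ h, spl rest = [h] := by
      cases hs : spl rest with
      | nil => exact absurd hs (spl_ne_nil rest)
      | cons a t =>
        rw [hs] at h1
        simp only [List.length_cons, Nat.add_eq_right, List.length_eq_zero_iff] at h1
        subst h1
        exact ⟨a, rfl⟩
    by_cases hc : c = '/'
    · subst hc
      simp [spl, hs, PySem.Chars.join_singleton]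
    · simp [spl, hc, hs, mapHead, PySem.Chars.join_nil]

theorem dirnameGo_succ (cs : List Char) (k : Nat) :
    dirnameGo cs (k + 1) =
      if PySem.List.pyGet? cs (k : Int) = some '/' then PySem.List.slice cs none (some (k : Int))
      else dirnameGo cs k := rfl

theorem dirnameGo_step (c : Char) (rest : List Char) :
    ∀ n, n ≤ rest.length →
    dirnameGo (c :: rest) (n + 1) = if '/' ∈ rest.take n then c :: dirnameGo rest n else [] := by
  intro n
  induction n with
  | zero =>
    intro _
    simp only [dirnameGo_succ, List.take_zero, List.not_mem_nil, if_false]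
    by_cases hc : c = '/'
    · subst hc; simp [PySem.List.pyGet?, PySem.List.pyIdx?, PySem.List.slice]
    · simp [PySem.List.pyGet?, PySem.List.pyIdx?, dirnameGo, hc]
  | succ n ih =>
    intro hle
    have hn : n < rest.length := by omega
    have hget : PySem.List.pyGet? (c :: rest) ((n + 1 : Nat) : Int) = rest[n]? := by
      rw [PySem.List.pyGet?_natCast]; simp
    have hgr : PySem.List.pyGet? rest ((n : Nat) : Int) = rest[n]? :=
      PySem.List.pyGet?_natCast rest n
    have htake : rest.take (n + 1) = rest.take n ++ [rest[n]] := by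
      rw [List.take_add_one]; simp [List.getElem?_eq_getElem hn]
    by_cases hsl : rest[n] = '/'
    · have h1 : PySem.List.pyGet? (c :: rest) ((n + 1 : Nat) : Int) = some '/' := by
        rw [hget, List.getElem?_eq_getElem hn, hsl]
      have h2 : PySem.List.pyGet? rest ((n : Nat) : Int) = some '/' := by
        rw [hgr, List.getElem?_eq_getElem hn, hsl]
      have hmem : '/' ∈ rest.take (n + 1) := by rw [htake, hsl]; simp
      rw [dirnameGo_succ, if_pos h1, if_pos hmem, dirnameGo_succ, if_pos h2,
        PySem.List.slice_to_natCast, PySem.List.slice_to_natCast]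
      simp [List.take_succ_cons]
    · have h1 : ¬ PySem.List.pyGet? (c :: rest) ((n + 1 : Nat) : Int) = some '/' := by
        rw [hget, List.getElem?_eq_getElem hn]; simp [hsl]
      have h2 : ¬ PySem.List.pyGet? rest ((n : Nat) : Int) = some '/' := by
        rw [hgr, List.getElem?_eq_getElem hn]; simp [hsl]
      have hmem : ('/' ∈ rest.take (n + 1)) ↔ ('/' ∈ rest.take n) := by
        rw [htake, List.mem_append]
        simp only [List.mem_singleton]
        constructor
        · rintro (h | h)
          · exact h
          · exact absurd h.symm hsl
        · exact Or.inl
      rw [dirnameGo_succ, if_neg h1, ih (by omega), dirnameGo_succ, if_neg h2]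
      by_cases hm : '/' ∈ rest.take n
      · rw [if_pos hm, if_pos (hmem.mpr hm)]
      · rw [if_neg hm, if_neg (fun h => hm (hmem.mp h))]

theorem go_eq_bChars (cs : List Char) : dirnameGo cs cs.length = bChars cs := by
  induction cs with
  | nil => simp [dirnameGo, bChars, spl, PySem.Chars.join_nil]
  | cons c rest ih =>
    rw [show (c :: rest).length = rest.length + 1 from rfl]
    rw [dirnameGo_step c rest rest.length (le_refl _), List.take_length, bChars_step, ih]

theorem dirname_spec : Claim_equal_dirname := by
  intro path _
  unfold Spec_dirname dirname dirname_alt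
  rw [splitOn_eq_spl, PySem.List.slice_to_neg_one]
  by_cases h : PySem.Str.len path = 0
  · rw [if_pos h]
    have : path.toList = [] := by
      have := PySem.Str.len_eq path
      have hl : path.toList.length = 0 := by omega
      exact List.eq_nil_of_length_eq_zero hl
    rw [this]
    simp [spl, PySem.Chars.join_nil]
  · rw [if_neg h, go_eq_bChars]
    rfl
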